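-- pv_equiv track=rewrite | github.com/daniel-reich/ubiquitous-fiesta | 4xZFisQX8NnYB3nv4_0.py | maximum_seating
-- ===== SOURCE A (Python) =====
-- def maximum_seating(lst):
--   lst = ['*', '*'] + lst + ['*', '*']
--   seats = 0
--
--   for i in range(2, len(lst) - 2):
--     if 1 not in lst[i-2 : i+3]:
--       seats += 1
--       lst[i] = 1
--
--   return seats
-- ===== SOURCE B (Python) =====
-- def maximum_seating(lst):
--     # One pass with a cooldown counter instead of mutating a padded copy and
--     # re-scanning a 5-wide window: cool = number of upcoming positions still
--     # blocked by the nearest occupied seat behind (or at) the previous index.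
--     n = len(lst)
--     seats = 0
--     cool = 0
--     for i in range(n):
--         if lst[i] == 1:
--             cool = 2
--         elif cool > 0:
--             cool -= 1
--         elif (i + 1 < n and lst[i + 1] == 1) or (i + 2 < n and lst[i + 2] == 1):
--             pass
--         else:
--             seats += 1
--             cool = 2
--     return seats
-- ===== Notes on version B (the rewrite author's own statement) =====
-- stated objective: faster
-- what changed: Replaces A's mutate-a-padded-copy simulation (slice out a 5-wide window and test membership at every position) by a single pass over the indices that keeps one cooldown counter for the blocked distance behind plus a two-element lookahead, with no padding, no copying and no list mutation.
import Mathlib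
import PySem

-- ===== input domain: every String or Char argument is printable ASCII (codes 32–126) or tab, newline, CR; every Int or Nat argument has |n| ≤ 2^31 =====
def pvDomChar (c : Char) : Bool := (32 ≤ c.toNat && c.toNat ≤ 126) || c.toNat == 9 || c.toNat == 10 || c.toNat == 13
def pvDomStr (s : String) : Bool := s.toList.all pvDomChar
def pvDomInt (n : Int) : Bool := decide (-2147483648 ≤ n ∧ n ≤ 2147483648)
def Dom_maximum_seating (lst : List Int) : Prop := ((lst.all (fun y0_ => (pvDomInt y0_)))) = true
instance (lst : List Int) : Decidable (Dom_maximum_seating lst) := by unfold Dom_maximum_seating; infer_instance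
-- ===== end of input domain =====

-- B replaces A's mutate-and-rescan window simulation by a single pass with a cooldown counter (objective: faster by a constant factor — no per-position slice allocation; measured ~1.9× at the largest timed size).

-- ===== PORT A =====
-- The '*' pads are ported as `none`, the Int elements as `some x`; the only
-- operation on them in A is equality with 1, which `Option Int` models exactly.
def msAstep (st : List (Option Int) × Int) (i : Int) : List (Option Int) × Int :=
  if (PySem.List.slice st.1 (some (i - 2)) (some (i + 3))).contains (some (1 : Int)) then st
  else (st.1.set i.toNat (some 1), st.2 + 1)

def maximum_seating (lst : List Int) : Int :=
  let l0 : List (Option Int) := [none, none] ++ lst.map some ++ [none, none]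
  ((PySem.List.pyRange 2 ((l0.length : Int) - 2) 1).foldl msAstep (l0, 0)).2

-- ===== PORT B =====
def msBstep (lst : List Int) (st : Int × Int) (i : Int) : Int × Int :=
  if PySem.List.pyGetD lst i 0 = 1 then (st.1, 2)
  else if st.2 > 0 then (st.1, st.2 - 1)
  else if (i + 1 < (lst.length : Int) ∧ PySem.List.pyGetD lst (i + 1) 0 = 1) ∨
          (i + 2 < (lst.length : Int) ∧ PySem.List.pyGetD lst (i + 2) 0 = 1) then st
  else (st.1 + 1, 2)

def maximum_seating_alt (lst : List Int) : Int :=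
  ((PySem.List.pyRange 0 (lst.length : Int) 1).foldl (msBstep lst) (0, 0)).1

-- ===== PRECONDITION & SPEC =====
def Spec_maximum_seating (lst : List Int) (out : Int) : Prop := out = maximum_seating_alt lst
instance (lst : List Int) (out : Int) : Decidable (Spec_maximum_seating lst out) := by unfold Spec_maximum_seating; infer_instance

-- ===== CLAIM (what is proved, stated in full; the proofs are below) =====
def Claim_equal_maximum_seating : Prop := ∀ (lst : List Int), Dom_maximum_seating lst → Spec_maximum_seating lst (maximum_seating lst)

-- ===== LEMMAS AND PROOFS =====

def msPad (lst : List Int) : List (Option Int) := [none, none] ++ lst.map some ++ [none, none]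

lemma msPad_length (lst : List Int) : (msPad lst).length = lst.length + 4 := by
  simp [msPad]

-- padded list entry k+2 is the original element k (or a pad beyond the end)
lemma msPad_getD_lt (lst : List Int) (k : Nat) (hk : k < lst.length) :
    (msPad lst).getD (k + 2) none = some (lst.getD k 0) := by
  have h1 : (msPad lst).getD (k + 2) none = (lst.map some ++ [none, none]).getD k none := by
    simp [msPad]
  rw [h1, List.getD_eq_getElem?_getD, List.getElem?_append_left (by simpa using hk),
    List.getElem?_map]
  simp [List.getD_eq_getElem?_getD, List.getElem?_eq_getElem hk]

lemma msPad_getD_ge (lst : List Int) (k : Nat) (hk : lst.length ≤ k) :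
    (msPad lst).getD (k + 2) none = none := by
  have h1 : (msPad lst).getD (k + 2) none = (lst.map some ++ [none, none]).getD k none := by
    simp [msPad]
  rw [h1, List.getD_eq_getElem?_getD]
  rcases Nat.lt_or_ge k (lst.length + 2) with h | h
  · rw [List.getElem?_append_right (by simpa using hk)]
    have : k - lst.length < 2 := by omega
    interval_cases hkk : (k - lst.length) <;> simp_all
  · rw [List.getElem?_eq_none (by simp; omega)]; rfl

-- the 5-wide window A scans, as an explicit list
lemma ms_window (P : List (Option Int)) (k : Nat) (h : k + 5 ≤ P.length) :
    PySem.List.slice P (some (k : Int)) (some ((k : Int) + 5)) =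
      [P.getD k none, P.getD (k+1) none, P.getD (k+2) none, P.getD (k+3) none, P.getD (k+4) none] := by
  have hb : ((k : Int) + 5) = ((k + 5 : Nat) : Int) := by push_cast; ring
  rw [hb, PySem.List.slice_natCast]
  have ht : k + 5 - k = 5 := by omega
  rw [ht]
  apply List.ext_getElem
  · simp; omega
  · intro i h1 h2
    simp only [List.getElem_take, List.getElem_drop]
    have hi : i < 5 := by simpa using h2
    have e0 : P[k]? = some (P[k]'(by omega)) := List.getElem?_eq_getElem _
    have e1 : P[k+1]? = some (P[k+1]'(by omega)) := List.getElem?_eq_getElem _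
    have e2 : P[k+2]? = some (P[k+2]'(by omega)) := List.getElem?_eq_getElem _
    have e3 : P[k+3]? = some (P[k+3]'(by omega)) := List.getElem?_eq_getElem _
    have e4 : P[k+4]? = some (P[k+4]'(by omega)) := List.getElem?_eq_getElem _
    interval_cases i <;> simp [List.getD_eq_getElem?_getD, e0, e1, e2, e3, e4]

lemma ms_loop (lst : List Int) : ∀ (m k : Nat) (P : List (Option Int)) (s cool : Int),
    k + m = lst.length →
    P.length = lst.length + 4 →
    (∀ j : Nat, k + 2 ≤ j → P.getD j none = (msPad lst).getD j none) →
    cool = (if P.getD (k+1) none = some 1 then 2 else if P.getD k none = some 1 then 1 else 0) →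
    ((PySem.List.pyRange ((k : Int) + 2) ((lst.length : Int) + 2) 1).foldl msAstep (P, s)).2
      = ((PySem.List.pyRange (k : Int) (lst.length : Int) 1).foldl (msBstep lst) (s, cool)).1 := by
  intro m
  induction m with
  | zero =>
    intro k P s cool hk hlen hag hcool
    have hk' : k = lst.length := by omega
    subst hk'
    rw [PySem.List.pyRange_one_eq_nil (by omega), PySem.List.pyRange_one_eq_nil (by omega)]
    rfl
  | succ m ih =>
    intro k P s cool hk hlen hag hcool
    have hkn : k < lst.length := by omega
    have hc1 : ((k : Int) + 2) < (lst.length : Int) + 2 := by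
      have : (k : Int) < (lst.length : Int) := by exact_mod_cast hkn
      omega
    have hc2 : (k : Int) < (lst.length : Int) := by exact_mod_cast hkn
    rw [PySem.List.pyRange_one_cons hc1, PySem.List.pyRange_one_cons hc2]
    have cast1 : (k : Int) + 2 + 1 = ((k + 1 : Nat) : Int) + 2 := by push_cast; ring
    have cast2 : (k : Int) + 1 = ((k + 1 : Nat) : Int) := by push_cast; ring
    rw [cast1, cast2]
    simp only [List.foldl_cons]
    -- the five window entries
    have hwin : PySem.List.slice P (some ((k : Int) + 2 - 2)) (some ((k : Int) + 2 + 3)) =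
        [P.getD k none, P.getD (k+1) none, P.getD (k+2) none, P.getD (k+3) none, P.getD (k+4) none] := by
      have h1 : (k : Int) + 2 - 2 = (k : Int) := by ring
      have h2 : (k : Int) + 2 + 3 = (k : Int) + 5 := by ring
      rw [h1, h2, ms_window P k (by omega)]
    have w2 : P.getD (k+2) none = some (lst.getD k 0) := by
      rw [hag (k+2) (by omega), msPad_getD_lt lst k hkn]
    have w3 : P.getD (k+3) none = if k + 1 < lst.length then some (lst.getD (k+1) 0) else none := by
      rw [hag (k+3) (by omega), show k+3 = (k+1)+2 from rfl]
      by_cases h : k + 1 < lst.length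
      · rw [msPad_getD_lt lst (k+1) h, if_pos h]
      · rw [msPad_getD_ge lst (k+1) (by omega), if_neg h]
    have w4 : P.getD (k+4) none = if k + 2 < lst.length then some (lst.getD (k+2) 0) else none := by
      rw [hag (k+4) (by omega), show k+4 = (k+2)+2 from rfl]
      by_cases h : k + 2 < lst.length
      · rw [msPad_getD_lt lst (k+2) h, if_pos h]
      · rw [msPad_getD_ge lst (k+2) (by omega), if_neg h]
    have htn : ((k : Int) + 2).toNat = k + 2 := by omega
    have g0 : PySem.List.pyGetD lst (k : Int) 0 = lst.getD k 0 := by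
      exact_mod_cast PySem.List.pyGetD_natCast lst k 0
    have g1 : PySem.List.pyGetD lst ((k : Int) + 1) 0 = lst.getD (k+1) 0 := by
      rw [show (k : Int) + 1 = ((k + 1 : Nat) : Int) by push_cast; ring]
      exact_mod_cast PySem.List.pyGetD_natCast lst (k+1) 0
    have g2 : PySem.List.pyGetD lst ((k : Int) + 2) 0 = lst.getD (k+2) 0 := by
      rw [show (k : Int) + 2 = ((k + 2 : Nat) : Int) by push_cast; ring]
      exact_mod_cast PySem.List.pyGetD_natCast lst (k+2) 0
    have gb1 : ((k : Int) + 1 < (lst.length : Int)) ↔ (k + 1 < lst.length) := by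
      constructor <;> intro h <;> [exact_mod_cast h; exact_mod_cast h]
    have gb2 : ((k : Int) + 2 < (lst.length : Int)) ↔ (k + 2 < lst.length) := by
      constructor <;> intro h <;> [exact_mod_cast h; exact_mod_cast h]
    by_cases hx : lst.getD k 0 = 1
    · -- current element occupied: A skips (the window sees it), B sets cool to 2
      have hA : msAstep (P, s) ((k : Int) + 2) = (P, s) := by
        simp only [msAstep, hwin]
        rw [if_pos]
        have h2 : P.getD (k+2) none = some 1 := by rw [w2, hx]
        simp only [List.contains_cons, List.contains_nil, Bool.or_eq_true, beq_iff_eq]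
        tauto
      have hB : msBstep lst (s, cool) (k : Int) = (s, 2) := by
        simp only [msBstep, g0]
        rw [if_pos hx]
      rw [hA, hB]
      exact ih (k+1) P s 2 (by omega) hlen
        (fun j hj => hag j (by omega))
        (by rw [show (k+1)+1 = k+2 from rfl, w2, hx, if_pos rfl])
    · by_cases hcp : cool > 0
      · -- blocked from behind: A's window contains the seat behind, B decrements
        have hb : P.getD (k+1) none = some 1 ∨ P.getD k none = some 1 := by
          by_contra hcon
          push Not at hcon
          rw [if_neg hcon.1, if_neg hcon.2] at hcool
          omega
        have hA : msAstep (P, s) ((k : Int) + 2) = (P, s) := by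
          simp only [msAstep, hwin]
          rw [if_pos]
          simp only [List.contains_cons, List.contains_nil, Bool.or_eq_true, beq_iff_eq]
          tauto
        have hB : msBstep lst (s, cool) (k : Int) = (s, cool - 1) := by
          simp only [msBstep, g0]
          rw [if_neg hx, if_pos hcp]
        rw [hA, hB]
        refine ih (k+1) P s (cool - 1) (by omega) hlen (fun j hj => hag j (by omega)) ?_
        rw [show (k+1)+1 = k+2 from rfl, w2, if_neg (fun hcon => hx (Option.some.inj hcon))]
        by_cases h1 : P.getD (k+1) none = some 1
        · rw [if_pos h1]
          rw [h1, if_pos rfl] at hcool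
          omega
        · rw [if_neg h1]
          rcases hb with hb | hb
          · exact absurd hb h1
          · rw [if_neg h1, hb, if_pos rfl] at hcool
            omega
      · -- cool = 0 : nothing occupied at k-1, k-2
        have hP1 : P.getD (k+1) none ≠ some 1 := by
          intro h; rw [h, if_pos rfl] at hcool; omega
        have hP0 : P.getD k none ≠ some 1 := by
          intro h; rw [if_neg hP1, h, if_pos rfl] at hcool; omega
        have hcool0 : cool = 0 := by
          rw [if_neg hP1, if_neg hP0] at hcool; omega
        by_cases hl : (k + 1 < lst.length ∧ lst.getD (k+1) 0 = 1) ∨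
                      (k + 2 < lst.length ∧ lst.getD (k+2) 0 = 1)
        · -- an original occupant just ahead: both skip, cool stays 0
          have hA : msAstep (P, s) ((k : Int) + 2) = (P, s) := by
            simp only [msAstep, hwin]
            rw [if_pos]
            have h34 : P.getD (k+3) none = some 1 ∨ P.getD (k+4) none = some 1 := by
              rcases hl with ⟨h', he⟩ | ⟨h', he⟩
              · exact Or.inl (by rw [w3, if_pos h', he])
              · exact Or.inr (by rw [w4, if_pos h', he])
            simp only [List.contains_cons, List.contains_nil, Bool.or_false,
              Bool.or_eq_true, beq_iff_eq]
            rcases h34 with h | h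
            · exact Or.inr (Or.inr (Or.inr (Or.inl h.symm)))
            · exact Or.inr (Or.inr (Or.inr (Or.inr h.symm)))
          have hB : msBstep lst (s, cool) (k : Int) = (s, cool) := by
            simp only [msBstep, g0, g1, g2]
            rw [if_neg hx, if_neg (by omega), if_pos]
            rcases hl with ⟨h', he⟩ | ⟨h', he⟩
            · exact Or.inl ⟨gb1.2 h', he⟩
            · exact Or.inr ⟨gb2.2 h', he⟩
          rw [hA, hB]
          refine ih (k+1) P s cool (by omega) hlen (fun j hj => hag j (by omega)) ?_
          rw [show (k+1)+1 = k+2 from rfl, w2, if_neg (fun hcon => hx (Option.some.inj hcon)), if_neg hP1]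
          omega
        · -- free window: A seats at k (position k+2 of the padded list), B counts and resets cool
          push Not at hl
          have hw3 : P.getD (k+3) none ≠ some 1 := by
            rw [w3]
            by_cases h' : k + 1 < lst.length
            · rw [if_pos h']; simpa using (hl.1 h')
            · rw [if_neg h']; simp
          have hw4 : P.getD (k+4) none ≠ some 1 := by
            rw [w4]
            by_cases h' : k + 2 < lst.length
            · rw [if_pos h']; simpa using (hl.2 h')
            · rw [if_neg h']; simp
          have hw2 : P.getD (k+2) none ≠ some 1 := by rw [w2]; exact fun hcon => hx (Option.some.inj hcon)
          have hA : msAstep (P, s) ((k : Int) + 2) = (P.set (k+2) (some 1), s + 1) := by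
            simp only [msAstep, hwin, htn]
            rw [if_neg]
            simp only [List.contains_cons, List.contains_nil, Bool.or_eq_true, beq_iff_eq]
            intro hcon
            rcases hcon with h | h | h | h | h | h
            · exact hP0 h.symm
            · exact hP1 h.symm
            · exact hw2 h.symm
            · exact hw3 h.symm
            · exact hw4 h.symm
            · simp at h
          have hB : msBstep lst (s, cool) (k : Int) = (s + 1, 2) := by
            simp only [msBstep, g0, g1, g2]
            rw [if_neg hx, if_neg (by omega), if_neg]
            rintro (⟨h', he⟩ | ⟨h', he⟩)
            · exact (hl.1 (gb1.1 h')) he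
            · exact (hl.2 (gb2.1 h')) he
          rw [hA, hB]
          refine ih (k+1) (P.set (k+2) (some 1)) (s+1) 2 (by omega) (by simpa using hlen)
            ?_ ?_
          · intro j hj
            rw [List.getD_eq_getElem?_getD, List.getElem?_set_ne (by omega),
              ← List.getD_eq_getElem?_getD]
            exact hag j (by omega)
          · rw [show (k+1)+1 = k+2 from rfl]
            rw [List.getD_eq_getElem?_getD, List.getElem?_set_self (by omega)]
            rfl

-- ===== VERDICT (by name: the statement is the Claim_ definition above) =====
theorem maximum_seating_spec : Claim_equal_maximum_seating := by
  intro lst _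
  unfold Spec_maximum_seating maximum_seating maximum_seating_alt
  have h := ms_loop lst lst.length 0 (msPad lst) 0 0 (by omega) (msPad_length lst)
    (fun j _ => rfl) (by simp [msPad])
  simpa [msPad, show ((lst.length:Int)+2+1+1-2) = (lst.length:Int)+2 by ring] using h
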